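-- pv_equiv track=rewrite | github.com/Pugazh04/Nethra-Mithra | spatial_analysis.py | reverse_relation
-- ===== SOURCE A (Python) =====
-- def reverse_relation(relation):
--     if " and " in relation:
--         parts = relation.split(" and ")
--         return " and ".join(reverse_relation(p) for p in parts)
--
--     mapping = {
--         "to the left of": "to the right of",
--         "to the right of": "to the left of",
--         "above": "below",
--         "below": "above",
--         "near": "near"
--     }
--     return mapping.get(relation, relation)
-- ===== SOURCE B (Python) =====
-- def reverse_relation(relation):
--     mapping = {
--         "to the left of": "to the right of",
--         "to the right of": "to the left of",
--         "above": "below",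
--         "below": "above",
--         "near": "near"
--     }
--     out = []
--     rest = relation
--     while True:
--         i = rest.find(" and ")
--         if i == -1:
--             out.append(mapping.get(rest, rest))
--             return "".join(out)
--         piece = rest[:i]
--         out.append(mapping.get(piece, piece))
--         out.append(" and ")
--         rest = rest[i + 5:]
-- ===== Notes on version B (the rewrite author's own statement) =====
-- stated objective: alternative
-- what changed: Replaces the split-then-recurse formulation (conditional recursion over the list produced by str.split, rejoined with str.join) with a single iterative left-to-right scan: a while loop that repeatedly locates the leftmost separator with str.find, maps the piece before it, slices it off, and appends to an output accumulator joined once at the end.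
import Mathlib
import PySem

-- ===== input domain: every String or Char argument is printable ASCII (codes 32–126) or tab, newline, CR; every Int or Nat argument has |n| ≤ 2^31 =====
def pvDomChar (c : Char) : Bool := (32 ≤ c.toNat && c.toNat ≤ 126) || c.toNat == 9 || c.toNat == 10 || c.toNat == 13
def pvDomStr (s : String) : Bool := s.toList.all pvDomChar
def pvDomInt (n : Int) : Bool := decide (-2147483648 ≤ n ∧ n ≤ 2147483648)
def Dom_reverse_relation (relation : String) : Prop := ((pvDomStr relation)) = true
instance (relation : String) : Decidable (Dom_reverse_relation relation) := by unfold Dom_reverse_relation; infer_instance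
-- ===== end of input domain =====

-- B replaces A's conditional split/recurse/join with an iterative leftmost-find scan over the
-- string, accumulating output pieces and joining once at the end (objective: alternative).


-- ===== PORT A =====
-- A's mapping dict (defined inside the Python function body)
def revMapA : PySem.Dict String String := PySem.Dict.ofList
  [("to the left of", "to the right of"),
   ("to the right of", "to the left of"),
   ("above", "below"),
   ("below", "above"),
   ("near", "near")]

-- A's unbounded recursion rendered with a fuel guard (fuel = |relation| + 1, always
-- sufficient: split parts never contain the separator, so recursion depth ≤ 1);
-- the fuel-0 branch is never reached on any input.
def revAgo : Nat → String → String
  | 0, relation => relation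
  | fuel + 1, relation =>
    if PySem.Str.isIn " and " relation then
      PySem.Str.join " and "
        (((PySem.Chars.splitOn relation.toList " and ".toList).map String.ofList).map
          (revAgo fuel))
    else
      PySem.Dict.getD revMapA relation relation

def reverse_relation (relation : String) : String :=
  revAgo (relation.toList.length + 1) relation

-- ===== PORT B =====
def revMapB : PySem.Dict String String := PySem.Dict.ofList
  [("to the left of", "to the right of"),
   ("to the right of", "to the left of"),
   ("above", "below"),
   ("below", "above"),
   ("near", "near")]

-- B's 'while True' loop, ported on code points (exact for strings); fuel = |rest| + 1 is
-- always sufficient (each iteration slices off at least 5 characters), so the fuel-0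
-- branch is never reached.
def revGoB : Nat → List Char → List (List Char) → List Char
  | 0, _, out => PySem.Chars.join [] out
  | fuel + 1, rest, out =>
    let i := PySem.Chars.find rest " and ".toList
    if i = -1 then
      PySem.Chars.join []
        (out ++ [(PySem.Dict.getD revMapB (String.ofList rest) (String.ofList rest)).toList])
    else
      revGoB fuel (PySem.Chars.slice rest (some (i + 5)) none)
        (out ++ [(PySem.Dict.getD revMapB (String.ofList (PySem.Chars.slice rest none (some i)))
                    (String.ofList (PySem.Chars.slice rest none (some i)))).toList,
                 " and ".toList])

def reverse_relation_alt (relation : String) : String :=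
  String.ofList (revGoB (relation.toList.length + 1) relation.toList [])

-- ===== PRECONDITION & SPEC =====
def Spec_reverse_relation (relation : String) (out : String) : Prop := out = reverse_relation_alt relation
instance (relation : String) (out : String) : Decidable (Spec_reverse_relation relation out) := by unfold Spec_reverse_relation; infer_instance

-- ===== CLAIM (what is proved, stated in full; the proofs are below) =====
def Claim_equal_reverse_relation : Prop := ∀ (relation : String), Dom_reverse_relation relation → Spec_reverse_relation relation (reverse_relation relation)

-- ===== LEMMAS AND PROOFS =====

-- the per-part lookup both programs perform, at the char-list level
def revLook (p : List Char) : List Char :=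
  (PySem.Dict.getD revMapB (String.ofList p) (String.ofList p)).toList

theorem joinNil (parts : List (List Char)) : PySem.Chars.join [] parts = parts.flatten := by
  induction parts with
  | nil => simp [PySem.Chars.join_nil]
  | cons p rest ih =>
    cases rest with
    | nil => simp [PySem.Chars.join_singleton]
    | cons q r => simp [PySem.Chars.join_cons_cons, ih]

-- If the separator never occurs, splitOn.go emits the remainder as one part.
theorem splitOn_go_no_sep (sep : List Char) :
    ∀ (fuel : Nat) (l cur : List Char) (acc : List (List Char)),
      ¬ sep <:+: (cur.reverse ++ l) →
      PySem.Chars.splitOn.go sep fuel l cur acc = ((cur.reverse ++ l) :: acc).reverse := by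
  intro fuel
  induction fuel with
  | zero => intro l cur acc _; rfl
  | succ n ih =>
    intro l cur acc h
    cases l with
    | nil => simp [PySem.Chars.splitOn.go]
    | cons c rest =>
      have hpre : sep.isPrefixOf (c :: rest) = false := by
        by_contra hx
        have : sep <+: (c :: rest) := List.isPrefixOf_iff_prefix.mp (by
          cases hy : sep.isPrefixOf (c :: rest) <;> simp_all)
        exact h (this.isInfix.trans (List.suffix_append cur.reverse (c :: rest)).isInfix)
      rw [PySem.Chars.splitOn.go, hpre]
      simp only [Bool.false_eq_true, if_false]
      have := ih rest (c :: cur) acc (by simpa using h)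
      simpa using this

-- No part produced by splitOn.go contains the (nonempty) separator, provided the
-- fuel exceeds the remaining length and no separator occurrence starts inside cur.
theorem splitOn_go_parts (sep : List Char) (hsep : sep ≠ []) :
    ∀ (fuel : Nat) (l cur : List Char) (acc : List (List Char)),
      l.length < fuel →
      (∀ a ∈ acc, ¬ sep <:+: a) →
      (∀ j, sep <+: (cur.reverse ++ l).drop j → cur.length ≤ j) →
      ∀ p ∈ PySem.Chars.splitOn.go sep fuel l cur acc, ¬ sep <:+: p := by
  intro fuel
  induction fuel with
  | zero => intro l cur acc hf; omega
  | succ n ih =>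
    intro l cur acc hf hacc hinv p hp
    have hcurfree : ¬ sep <:+: cur.reverse := by
      rintro ⟨pre, suf, hps⟩
      have hrl : cur.reverse.length = cur.length := by simp
      have hlen : pre.length + sep.length + suf.length = cur.reverse.length := by
        have := congrArg List.length hps; simp only [List.length_append] at this; omega
      have hsl : 1 ≤ sep.length := by
        cases sep with
        | nil => exact absurd rfl hsep
        | cons a t => simp
      have hpref : sep <+: (cur.reverse ++ l).drop pre.length := by
        have h1 : cur.reverse.drop pre.length = sep ++ suf := by
          rw [← hps]; simp
        have : (cur.reverse ++ l).drop pre.length = sep ++ (suf ++ l) := by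
          rw [List.drop_append_of_le_length (by omega), h1, List.append_assoc]
        rw [this]; exact ⟨suf ++ l, rfl⟩
      have := hinv pre.length hpref
      omega
    cases l with
    | nil =>
      simp only [PySem.Chars.splitOn.go, List.reverse_cons] at hp
      rcases (by simpa using hp : p ∈ acc.reverse ∨ p = cur.reverse) with h | h
      · exact hacc p (List.mem_reverse.mp h)
      · subst h; exact hcurfree
    | cons c rest =>
      by_cases hpre : sep.isPrefixOf (c :: rest) = true
      · rw [PySem.Chars.splitOn.go, hpre] at hp
        simp only [if_true] at hp
        refine ih ((c :: rest).drop sep.length) [] (cur.reverse :: acc) ?_ ?_ ?_ p hp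
        · have : ((c :: rest).drop sep.length).length ≤ rest.length := by
            have hsl : 1 ≤ sep.length := by
              cases sep with
              | nil => exact absurd rfl hsep
              | cons a t => simp
            simp only [List.length_drop, List.length_cons]; omega
          simp only [List.length_cons] at hf; omega
        · intro a ha
          rcases List.mem_cons.mp ha with rfl | ha
          · exact hcurfree
          · exact hacc a ha
        · intro j _; simp
      · have hpre' : sep.isPrefixOf (c :: rest) = false := by
          cases hy : sep.isPrefixOf (c :: rest) <;> simp_all
        rw [PySem.Chars.splitOn.go, hpre'] at hp
        simp only [Bool.false_eq_true, if_false] at hp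
        refine ih rest (c :: cur) acc ?_ hacc ?_ p hp
        · simp only [List.length_cons] at hf; omega
        · intro j hj
          have hj' : sep <+: (cur.reverse ++ (c :: rest)).drop j := by
            simpa using hj
          have h1 : cur.length ≤ j := hinv j hj'
          rcases Nat.lt_or_ge cur.length j with h2 | h2
          · simpa using h2
          · have hje : j = cur.length := le_antisymm h2 h1
            subst hje
            have : sep <+: (c :: rest) := by
              simpa [List.drop_append_of_le_length] using hj'
            exact absurd (List.isPrefixOf_iff_prefix.mpr this) (by simp [hpre'])

theorem splitOn_parts_not_infix (sep s : List Char) (hsep : sep ≠ []) :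
    ∀ p ∈ PySem.Chars.splitOn s sep, ¬ sep <:+: p := by
  intro p hp
  refine splitOn_go_parts sep hsep (s.length + 1) s [] [] (by omega) (by simp) ?_ p hp
  intro j _; simp

theorem splitOn_of_not_infix (sep s : List Char) (h : ¬ sep <:+: s) :
    PySem.Chars.splitOn s sep = [s] := by
  unfold PySem.Chars.splitOn
  rw [splitOn_go_no_sep sep (s.length + 1) s [] [] (by simpa using h)]
  simp

-- splitOn.go's result does not depend on the fuel, as long as it exceeds |l|.
theorem splitOn_go_indep (sep : List Char) (hsep : sep ≠ []) :
    ∀ (f₁ f₂ : Nat) (l cur : List Char) (acc : List (List Char)),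
      l.length < f₁ → l.length < f₂ →
      PySem.Chars.splitOn.go sep f₁ l cur acc = PySem.Chars.splitOn.go sep f₂ l cur acc := by
  intro f₁
  induction f₁ with
  | zero => intro f₂ l cur acc h1; omega
  | succ n ih =>
    intro f₂ l cur acc h1 h2
    cases f₂ with
    | zero => omega
    | succ m =>
      cases l with
      | nil => simp [PySem.Chars.splitOn.go]
      | cons c rest =>
        have hsl : 1 ≤ sep.length := by
          cases sep with
          | nil => exact absurd rfl hsep
          | cons a t => simp
        rw [PySem.Chars.splitOn.go, PySem.Chars.splitOn.go]
        by_cases hpre : sep.isPrefixOf (c :: rest) = true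
        · rw [hpre]
          simp only [if_true]
          refine ih m ((c :: rest).drop sep.length) [] (cur.reverse :: acc) ?_ ?_ <;>
            · simp only [List.length_drop, List.length_cons] at *; omega
        · have hpre' : sep.isPrefixOf (c :: rest) = false := by
            cases hy : sep.isPrefixOf (c :: rest) <;> simp_all
          rw [hpre']
          simp only [Bool.false_eq_true, if_false]
          refine ih m rest (c :: cur) acc ?_ ?_ <;>
            · simp only [List.length_cons] at *; omega

-- the accumulator is a passive prefix of splitOn.go's result
theorem splitOn_go_acc (sep : List Char) (hsep : sep ≠ []) :
    ∀ (fuel : Nat) (l cur : List Char) (acc : List (List Char)),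
      l.length < fuel →
      PySem.Chars.splitOn.go sep fuel l cur acc
        = acc.reverse ++ PySem.Chars.splitOn.go sep fuel l cur [] := by
  intro fuel
  induction fuel with
  | zero => intro l cur acc h1; omega
  | succ n ih =>
    intro l cur acc h1
    cases l with
    | nil => simp [PySem.Chars.splitOn.go]
    | cons c rest =>
      have hsl : 1 ≤ sep.length := by
        cases sep with
        | nil => exact absurd rfl hsep
        | cons a t => simp
      rw [PySem.Chars.splitOn.go, PySem.Chars.splitOn.go]
      by_cases hpre : sep.isPrefixOf (c :: rest) = true
      · rw [hpre]
        simp only [if_true]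
        have hlen : ((c :: rest).drop sep.length).length < n := by
          simp only [List.length_drop, List.length_cons] at *; omega
        rw [ih _ _ (cur.reverse :: acc) hlen, ih _ _ [cur.reverse] hlen]
        simp
      · have hpre' : sep.isPrefixOf (c :: rest) = false := by
          cases hy : sep.isPrefixOf (c :: rest) <;> simp_all
        rw [hpre']
        simp only [Bool.false_eq_true, if_false]
        exact ih rest (c :: cur) acc (by simp only [List.length_cons] at *; omega)

-- splitOn.go walks over a separator-free prefix, moving it into cur
theorem splitOn_go_skip (sep : List Char) :
    ∀ (a : List Char) (fuel : Nat) (l cur : List Char) (acc : List (List Char)),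
      a.length + l.length < fuel →
      (∀ j, j < a.length → ¬ sep <+: (a ++ l).drop j) →
      PySem.Chars.splitOn.go sep fuel (a ++ l) cur acc
        = PySem.Chars.splitOn.go sep (fuel - a.length) l (a.reverse ++ cur) acc := by
  intro a
  induction a with
  | nil => intro fuel l cur acc _ _; simp
  | cons c a' ih =>
    intro fuel l cur acc hf hocc
    cases fuel with
    | zero => omega
    | succ n =>
      have h0 : ¬ sep <+: (c :: (a' ++ l)) := by
        have := hocc 0 (by simp)
        simpa using this
      have hpre : sep.isPrefixOf (c :: (a' ++ l)) = false := by
        by_contra hx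
        exact h0 (List.isPrefixOf_iff_prefix.mp (by
          cases hy : sep.isPrefixOf (c :: (a' ++ l)) <;> simp_all))
      rw [List.cons_append, PySem.Chars.splitOn.go, hpre]
      simp only [Bool.false_eq_true, if_false]
      have := ih n l (c :: cur) acc (by simp only [List.length_cons] at hf; omega)
        (fun j hj => by
          have := hocc (j + 1) (by simp only [List.length_cons]; omega)
          simpa using this)
      rw [this]
      have harith : n - a'.length = n + 1 - (c :: a').length := by
        simp only [List.length_cons]; omega
      rw [← harith]
      congr 1
      simp

theorem splitOn_go_ne_nil (sep : List Char) :
    ∀ (fuel : Nat) (l cur : List Char) (acc : List (List Char)),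
      PySem.Chars.splitOn.go sep fuel l cur acc ≠ [] := by
  intro fuel
  induction fuel with
  | zero => intro l cur acc; simp [PySem.Chars.splitOn.go]
  | succ n ih =>
    intro l cur acc
    cases l with
    | nil => simp [PySem.Chars.splitOn.go]
    | cons c rest =>
      rw [PySem.Chars.splitOn.go]
      split_ifs with h
      · exact ih _ _ _
      · exact ih _ _ _

theorem splitOn_ne_nil (sep s : List Char) : PySem.Chars.splitOn s sep ≠ [] := by
  unfold PySem.Chars.splitOn
  exact splitOn_go_ne_nil sep _ s [] []

-- splitting at the FIRST occurrence of the separator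
theorem splitOn_first (sep : List Char) (hsep : sep ≠ []) (a b s : List Char)
    (hs : s = a ++ sep ++ b) (hocc : ∀ j, j < a.length → ¬ sep <+: s.drop j) :
    PySem.Chars.splitOn s sep = a :: PySem.Chars.splitOn b sep := by
  have hsl : 1 ≤ sep.length := by
    cases sep with
    | nil => exact absurd rfl hsep
    | cons x t => simp
  have hslen : s.length = a.length + sep.length + b.length := by
    subst hs; simp; omega
  subst hs
  unfold PySem.Chars.splitOn
  rw [List.append_assoc]
  rw [splitOn_go_skip sep a ((a ++ (sep ++ b)).length + 1) (sep ++ b) [] []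
    (by simp)
    (fun j hj => by
      have := hocc j hj
      rw [List.append_assoc] at this
      exact this)]
  have hF : (a ++ (sep ++ b)).length + 1 - a.length = sep.length + b.length + 1 := by
    simp only [List.length_append]; omega
  rw [hF]
  cases sep with
  | nil => exact absurd rfl hsep
  | cons s0 st =>
    have hpre : (s0 :: st).isPrefixOf (s0 :: (st ++ b)) = true :=
      List.isPrefixOf_iff_prefix.mpr (List.prefix_append (s0 :: st) b)
    rw [List.cons_append, PySem.Chars.splitOn.go, hpre]
    simp only [if_true]
    have hdrop : (s0 :: (st ++ b)).drop (s0 :: st).length = b := List.drop_left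
    rw [hdrop]
    have hfuel : b.length < (s0 :: st).length + b.length := by simp
    rw [splitOn_go_acc (s0 :: st) hsep _ b [] _ hfuel,
        splitOn_go_indep (s0 :: st) hsep _ (b.length + 1) b [] [] hfuel (by omega)]
    simp

-- B's loop computes "join of out so far" ++ "A's join-of-mapped-parts of the remainder"
theorem revGoB_spec :
    ∀ (fuel : Nat) (rest : List Char) (out : List (List Char)),
      rest.length < fuel →
      revGoB fuel rest out
        = PySem.Chars.join [] out
          ++ PySem.Chars.join " and ".toList
               ((PySem.Chars.splitOn rest " and ".toList).map revLook) := by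
  intro fuel
  induction fuel with
  | zero => intro rest out h; omega
  | succ f ih =>
    intro rest out h
    rw [revGoB]
    by_cases hfind : PySem.Chars.find rest " and ".toList = -1
    · simp only [hfind]
      have hni : ¬ (" and ".toList) <:+: rest :=
        (PySem.Chars.find_eq_neg_one_iff rest " and ".toList).mp hfind
      rw [splitOn_of_not_infix _ _ hni]
      simp [joinNil, PySem.Chars.join_singleton, revLook]
    · simp only [if_neg hfind]
      have hspec := PySem.Chars.findFrom_natCast_spec rest " and ".toList 0 (by omega)
        (by simpa using hfind)
      simp only [Nat.cast_zero, PySem.Chars.findFrom_zero] at hspec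
      obtain ⟨hge, hpref, hmin⟩ := hspec
      set i := PySem.Chars.find rest " and ".toList with hi
      set n := i.toNat with hn
      obtain ⟨t, ht⟩ := hpref
      have hsepl : (" and ".toList).length = 5 := by decide
      have hnlen : n + 5 ≤ rest.length := by
        have := congrArg List.length ht
        simp only [List.length_drop, List.length_append, hsepl] at this
        omega
      have hdec : rest = rest.take n ++ " and ".toList ++ t := by
        conv_rhs => rw [List.append_assoc, ht]
        exact (List.take_append_drop n rest).symm
      have ht' : t = rest.drop (n + 5) := by
        have h1 : List.drop 5 (" and ".toList ++ t) = t := by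
          have h2 : List.drop (" and ".toList).length (" and ".toList ++ t) = t :=
            List.drop_left
          rw [hsepl] at h2
          exact h2
        conv_lhs => rw [← h1, ht]
        rw [List.drop_drop]
      have hsplit : PySem.Chars.splitOn rest " and ".toList
          = rest.take n :: PySem.Chars.splitOn t " and ".toList := by
        refine splitOn_first " and ".toList (by decide) (rest.take n) t rest hdec ?_
        intro j hj
        have hjn : j < n := by
          have : (rest.take n).length = n := by
            simp [List.length_take]; omega
          omega
        exact hmin j (by omega) hjn
      have hslice_to : PySem.Chars.slice rest none (some i) = rest.take n :=
        PySem.List.slice_to rest hge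
      have hslice_from : PySem.Chars.slice rest (some (i + 5)) none = rest.drop (n + 5) := by
        have h5 : (0:Int) ≤ i + 5 := by omega
        have htn : (i + 5).toNat = n + 5 := by omega
        have h6 := PySem.List.slice_from rest h5
        rw [htn] at h6
        exact h6
      rw [hslice_to, hslice_from]
      have hlen' : (rest.drop (n + 5)).length < f := by
        simp only [List.length_drop]; omega
      rw [ih (rest.drop (n + 5)) _ hlen']
      rw [hsplit, ht']
      obtain ⟨p, ps, hps⟩ : ∃ p ps,
          PySem.Chars.splitOn (rest.drop (n + 5)) " and ".toList = p :: ps := by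
        cases hc : PySem.Chars.splitOn (rest.drop (n + 5)) " and ".toList with
        | nil => exact absurd hc (splitOn_ne_nil _ _)
        | cons p ps => exact ⟨p, ps, rfl⟩
      rw [hps]
      simp only [List.map_cons, PySem.Chars.join_cons_cons, joinNil, List.flatten_append]
      simp [revLook]

-- the String-level join both formulations reduce to
theorem strJoin_ofList (sep : String) (l : List (List Char)) (h : List Char → String) :
    PySem.Str.join sep (l.map h)
      = String.ofList (PySem.Chars.join sep.toList (l.map (fun p => (h p).toList))) := by
  conv_lhs => rw [← String.ofList_toList (s := PySem.Str.join sep (l.map h))]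
  rw [PySem.Str.toList_join, List.map_map]
  rfl

-- ===== VERDICT (by name: the statement is the Claim_ definition above) =====
theorem reverse_relation_spec : Claim_equal_reverse_relation := by
  intro relation _
  unfold Spec_reverse_relation
  have hB : reverse_relation_alt relation
      = String.ofList (PySem.Chars.join " and ".toList
          ((PySem.Chars.splitOn relation.toList " and ".toList).map revLook)) := by
    unfold reverse_relation_alt
    rw [revGoB_spec (relation.toList.length + 1) relation.toList [] (by omega)]
    simp [PySem.Chars.join_nil]
  rw [hB]
  unfold reverse_relation
  rw [revAgo]
  by_cases h : PySem.Str.isIn " and " relation = true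
  · rw [if_pos h]
    rw [List.map_map]
    rw [strJoin_ofList " and " (PySem.Chars.splitOn relation.toList " and ".toList) _]
    congr 1
    congr 1
    apply List.map_congr_left
    intro p hp
    have hfree : ¬ (" and ".toList) <:+: p :=
      splitOn_parts_not_infix " and ".toList relation.toList (by decide) p hp
    have hlen : 1 ≤ relation.toList.length := by
      have hinf : (" and ".toList) <:+: relation.toList :=
        (PySem.Str.isIn_iff_infix " and " relation).mp h
      have h5 : (" and ".toList).length = 5 := by decide
      have := hinf.length_le
      omega
    obtain ⟨m, hm⟩ : ∃ m, relation.toList.length = m + 1 :=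
      ⟨relation.toList.length - 1, by omega⟩
    simp only [Function.comp]
    rw [hm, revAgo]
    have hIn : PySem.Str.isIn " and " (String.ofList p) = false := by
      apply (PySem.Chars.isIn_eq_false_iff _ _).mpr
      simpa using hfree
    rw [hIn]
    simp [revLook, revMapA, revMapB]
  · rw [if_neg h]
    have hnot : ¬ (" and ".toList) <:+: relation.toList := by
      intro hx
      exact h ((PySem.Str.isIn_iff_infix " and " relation).mpr hx)
    rw [splitOn_of_not_infix _ _ hnot]
    simp only [List.map_cons, List.map_nil, PySem.Chars.join_singleton]
    rw [show revLook relation.toList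
        = (PySem.Dict.getD revMapB relation relation).toList by
      simp [revLook, String.ofList_toList]]
    rw [String.ofList_toList]
    simp [revMapA, revMapB]
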